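-- pv_equiv track=rewrite | github.com/KislyLemon4ik/AOIS-3-year-2-sem | lab1.py | divide_fraction
-- ===== SOURCE A (Python) =====
-- def summa(number_1, number_2):
--     index = len(number_1) - 1
--     result = []
--     while index > -1:
--         if number_1[index] + number_2[index] < 2:
--             result.insert(0, number_1[index] + number_2[index])
--         else:
--             result.insert(0, number_1[index] + number_2[index] - 2)
--             if index > 0:
--                 number_1[index - 1] = number_1[index - 1] + 1
--         index = index - 1
--     return result
--
-- def subtract_numbers(number_1, number_2):
--     number2 = number_2.copy()
--
--     number1 = number_1.copy()
--
--     while len(number2) < len(number1):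
--         number2.insert(0, 0)
--     number1.insert(0, 0)
--     number2.insert(0, 1)
--     number2 = add_one(swap(number2))
--     result = summa(number1, number2)
--     result.pop(0)
--     return result
--
-- def compare_numbers(number1, number2):
--     ix = 0
--     num2 = number2.copy()
--     if len(number1) < len(number2):
--         return False
--     while len(number1) > len(num2):
--         num2.insert(0, 0)
--     while ix < len(number1):
--         if number1[ix] > num2[ix]:
--             return True
--         elif number1[ix] == num2[ix]:
--             ix += 1
--         else:
--             return False
--     return True
--
-- def swap(binar_number):
--     result = [0] * len(binar_number)
--     result[0] = binar_number[0]
--     ix = 1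
--     while ix < len(binar_number):
--         if binar_number[ix] == 0:
--             result[ix] = 1
--         else:
--             result[ix] = 0
--         ix -= 1
--         ix += 2
--     return result
--
-- def add_one(binar_number):
--     first = [0 for ix in range(len(binar_number))]
--     first[len(binar_number)-1] = 1
--     return summa(binar_number, first)
--
-- def divide_fraction(number_1, number_2):
--     quotient = []
--     for _ in range(30):
--         number_1.append(0)
--
--         if compare_numbers(number_1, number_2):
--             number_1 = subtract_numbers(number_1, number_2)
--             quotient.append(1)
--
--         else:
--             quotient.append(0)
--     return quotient
-- ===== SOURCE B (Python) =====
-- def _ge(a, b):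
--     if len(a) < len(b):
--         return False
--     bb = [0] * (len(a) - len(b)) + b
--     for x, y in zip(a, bb):
--         if x != y:
--             return x > y
--     return True
--
-- def _sub(a, b):
--     # one LSB-to-MSB pass fusing A's flip / add-one / ripple-add chain: two carries
--     bb = [0] * (len(a) - len(b)) + b
--     out = []
--     c1, c2 = 1, 0
--     for x, y in zip(reversed(a), reversed(bb)):
--         f = 1 if y == 0 else 0
--         s1 = f + c1
--         w, c1 = (s1, 0) if s1 < 2 else (s1 - 2, 1)
--         s2 = x + w + c2
--         d, c2 = (s2, 0) if s2 < 2 else (s2 - 2, 1)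
--         out.append(d)
--     out.reverse()
--     return out
--
-- def divide_fraction(number_1, number_2):
--     r = list(number_1)
--     quotient = []
--     for _ in range(30):
--         r = r + [0]
--         if _ge(r, number_2):
--             r = _sub(r, number_2)
--             quotient.append(1)
--         else:
--             quotient.append(0)
--     return quotient
-- ===== Notes on version B (the rewrite author's own statement) =====
-- stated objective: faster
-- what changed: B replaces A's three-pass, mutation-heavy subtraction (bit-flip pass, add-one ripple pass, final ripple-add pass, each built with O(n) front inserts and in-place carry writes) by a single fused LSB-to-MSB pass threading two carries over reversed lists, and A's index-loop comparison by a zip scan; no list is mutated.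
import Mathlib
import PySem

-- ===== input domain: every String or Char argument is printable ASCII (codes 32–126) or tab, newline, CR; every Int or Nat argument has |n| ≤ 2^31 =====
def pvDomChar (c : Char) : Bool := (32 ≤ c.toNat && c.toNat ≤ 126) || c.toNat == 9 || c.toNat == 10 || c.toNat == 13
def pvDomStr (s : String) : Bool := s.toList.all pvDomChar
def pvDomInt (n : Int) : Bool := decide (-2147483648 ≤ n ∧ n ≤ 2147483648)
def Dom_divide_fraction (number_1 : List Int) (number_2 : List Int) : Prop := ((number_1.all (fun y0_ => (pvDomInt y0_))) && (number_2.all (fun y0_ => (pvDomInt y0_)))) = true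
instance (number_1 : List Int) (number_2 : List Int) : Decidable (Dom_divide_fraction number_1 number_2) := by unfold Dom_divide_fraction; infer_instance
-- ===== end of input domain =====

-- B replaces A's three-pass, mutation-heavy digit subtraction (swap, add_one, summa with
-- front inserts and in-place carry writes) by ONE fused LSB-to-MSB pass with two threaded
-- carries over reversed lists, and A's index-loop comparison by a zip scan.  Equivalence is
-- about the RETURN value only: A mutates its first argument (appends 0s to the caller's
-- list until the first subtraction rebinds it), B does not.

-- ===== PORT A =====
-- summa's while loop, index counting down; fuel i is Python's index+1.
-- List.getD is exact here: every index used at every call site reached from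
-- divide_fraction is non-negative and in range for both lists.
def summaGo (number_2 : List Int) : List Int → Nat → List Int → List Int
  | _, 0, result => result
  | number_1, i+1, result =>
      let s := number_1.getD i 0 + number_2.getD i 0
      if s < 2 then
        summaGo number_2 number_1 i (s :: result)
      else
        summaGo number_2
          (if 0 < i then number_1.set (i-1) (number_1.getD (i-1) 0 + 1) else number_1)
          i ((s - 2) :: result)

def summa (number_1 number_2 : List Int) : List Int :=
  summaGo number_2 number_1 number_1.length []

-- exact for nonempty input (Python raises IndexError on []; never called on [] here)
def swap (binar_number : List Int) : List Int :=
  match binar_number with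
  | [] => []
  | x :: rest => x :: rest.map (fun v => if v = 0 then 1 else 0)

def add_one (binar_number : List Int) : List Int :=
  summa binar_number (List.replicate (binar_number.length - 1) 0 ++ [1])

def subtract_numbers (number_1 number_2 : List Int) : List Int :=
  let number2 := List.replicate (number_1.length - number_2.length) 0 ++ number_2
  let number1 := (0 : Int) :: number_1
  let number2 := (1 : Int) :: number2
  let number2 := add_one (swap number2)
  let result := summa number1 number2
  result.tail

def compareGo (number1 num2 : List Int) (ix : Nat) : Bool :=
  if ix < number1.length then
    if number1.getD ix 0 > num2.getD ix 0 then true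
    else if number1.getD ix 0 = num2.getD ix 0 then compareGo number1 num2 (ix+1)
    else false
  else true
termination_by number1.length - ix

def compare_numbers (number1 number2 : List Int) : Bool :=
  if number1.length < number2.length then false
  else compareGo number1 (List.replicate (number1.length - number2.length) 0 ++ number2) 0

def divGo (number_2 : List Int) : Nat → List Int → List Int → List Int
  | 0, _, quotient => quotient
  | k+1, number_1, quotient =>
      let number_1 := number_1 ++ [0]
      if compare_numbers number_1 number_2 then
        divGo number_2 k (subtract_numbers number_1 number_2) (quotient ++ [1])
      else
        divGo number_2 k number_1 (quotient ++ [0])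

def divide_fraction (number_1 : List Int) (number_2 : List Int) : List Int :=
  divGo number_2 30 number_1 []

-- ===== PORT B =====
-- the zip loop of _ge: first differing pair decides
def geGo : List (Int × Int) → Bool
  | [] => true
  | (x, y) :: rest => if x ≠ y then decide (x > y) else geGo rest

def geB (a b : List Int) : Bool :=
  if a.length < b.length then false
  else geGo (a.zip (List.replicate (a.length - b.length) 0 ++ b))

-- the fused loop of _sub over LSB-first pairs: carry c1 of the +1 chain, carry c2 of the sum
def fuseGo : List (Int × Int) → Int → Int → List Int
  | [], _, _ => []
  | (x, y) :: rest, c1, c2 =>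
      let f : Int := if y = 0 then 1 else 0
      let s1 := f + c1
      let w := if s1 < 2 then s1 else s1 - 2
      let c1' : Int := if s1 < 2 then 0 else 1
      let s2 := x + w + c2
      let d := if s2 < 2 then s2 else s2 - 2
      let c2' : Int := if s2 < 2 then 0 else 1
      d :: fuseGo rest c1' c2'

def subB (a b : List Int) : List Int :=
  (fuseGo (a.reverse.zip ((List.replicate (a.length - b.length) 0 ++ b).reverse)) 1 0).reverse

def bGo (d : List Int) : Nat → List Int → List Int → List Int
  | 0, _, quotient => quotient
  | k+1, r, quotient =>
      let r := r ++ [0]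
      if geB r d then bGo d k (subB r d) (quotient ++ [1])
      else bGo d k r (quotient ++ [0])

def divide_fraction_alt (number_1 : List Int) (number_2 : List Int) : List Int :=
  bGo number_2 30 number_1 []

-- ===== PRECONDITION & SPEC =====
def Spec_divide_fraction (number_1 : List Int) (number_2 : List Int) (out : List Int) : Prop := out = divide_fraction_alt number_1 number_2
instance (number_1 : List Int) (number_2 : List Int) (out : List Int) : Decidable (Spec_divide_fraction number_1 number_2 out) := by unfold Spec_divide_fraction; infer_instance

-- ===== CLAIM (what is proved, stated in full; the proofs are below) =====
def Claim_equal_divide_fraction : Prop := ∀ (number_1 : List Int) (number_2 : List Int), Dom_divide_fraction number_1 number_2 → Spec_divide_fraction number_1 number_2 (divide_fraction number_1 number_2)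

-- ===== LEMMAS AND PROOFS =====

theorem pvTake_take_pred (a a' : List Int) (i : Nat) (h : a.take (i+1) = a'.take (i+1)) :
    a.take i = a'.take i := by
  have : (a.take (i+1)).take i = (a'.take (i+1)).take i := by rw [h]
  simpa [List.take_take] using this

theorem pvGetD_of_take_eq (a a' : List Int) (i j : Nat) (hj : j < i)
    (h : a.take i = a'.take i) : a.getD j 0 = a'.getD j 0 := by
  rw [List.getD_eq_getElem?_getD, List.getD_eq_getElem?_getD,
    ← List.getElem?_take_of_lt (l := a) hj, h, List.getElem?_take_of_lt hj]

-- reads of summaGo depend only on the first i elements of number_1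
theorem summaGo_congr (b : List Int) : ∀ (i : Nat) (a a' res : List Int),
    a.take i = a'.take i → summaGo b a i res = summaGo b a' i res := by
  intro i
  induction i with
  | zero => intro a a' res _; rfl
  | succ i ih =>
    intro a a' res h
    have hget : ∀ j, j < i + 1 → a.getD j 0 = a'.getD j 0 := fun j hj =>
      pvGetD_of_take_eq a a' (i+1) j hj h
    simp only [summaGo]
    rw [hget i (by omega)]
    split
    · exact ih a a' _ (pvTake_take_pred a a' i h)
    · by_cases hi : 0 < i
      · simp only [if_pos hi]
        rw [hget (i-1) (by omega)]
        apply ih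
        rw [List.take_set, List.take_set, pvTake_take_pred a a' i h]
      · simp only [if_neg hi]
        exact ih a a' _ (pvTake_take_pred a a' i h)

-- number_1 with the pending carry c already added at the top of the unprocessed prefix
def addcAt (a : List Int) (i : Nat) (c : Int) : List Int :=
  if c = 1 ∧ 0 < i then a.set (i-1) (a.getD (i-1) 0 + 1) else a

theorem addcAt_zero (a : List Int) (i : Nat) : addcAt a i 0 = a := by
  simp [addcAt]

theorem addcAt_succ_one (a : List Int) (i : Nat) :
    addcAt a (i+1) 1 = a.set i (a.getD i 0 + 1) := by
  simp [addcAt]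

theorem pvTake_succ (l : List Int) (i : Nat) (h : i < l.length) :
    l.take (i+1) = l.take i ++ [l.getD i 0] := by
  rw [List.getD_eq_getElem?_getD, List.getElem?_eq_getElem h]
  exact List.take_succ_eq_append_getElem h

-- A's ripple chain, written functionally over LSB-first pairs with one threaded carry
def addL : List (Int × Int) → Int → List Int
  | [], _ => []
  | (x, y) :: rest, c =>
      let s := x + y + c
      if s < 2 then s :: addL rest 0 else (s - 2) :: addL rest 1

-- A's +1 chain of add_one, LSB-first with one threaded carry
def incL : List Int → Int → List Int
  | [], _ => []
  | f :: rest, c =>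
      let s := f + c
      if s < 2 then s :: incL rest 0 else (s - 2) :: incL rest 1

theorem summaGo_addL : ∀ (i : Nat) (u v res : List Int) (c : Int),
    (c = 0 ∨ c = 1) → i ≤ u.length → i ≤ v.length →
    summaGo v (addcAt u i c) i res
      = (addL (((u.take i).zip (v.take i)).reverse) c).reverse ++ res := by
  intro i
  induction i with
  | zero =>
    intro u v res c hc _ _
    rcases hc with hc | hc <;> subst hc <;> simp [addcAt, summaGo, addL]
  | succ i ih =>
    intro u v res c hc hla hlb
    have hila : i < u.length := by omega
    have hilb : i < v.length := by omega
    have hread : (addcAt u (i+1) c).getD i 0 = u.getD i 0 + c := by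
      rcases hc with hc | hc <;> subst hc
      · simp [addcAt_zero]
      · rw [addcAt_succ_one, List.getD_eq_getElem?_getD]
        simp [List.getElem?_set_self, hila]
    have htk : (addcAt u (i+1) c).take i = u.take i := by
      rcases hc with hc | hc <;> subst hc
      · rw [addcAt_zero]
      · rw [addcAt_succ_one, List.take_set]
        exact List.set_eq_of_length_le (by simp)
    have hzip : ((u.take (i+1)).zip (v.take (i+1))).reverse
        = (u.getD i 0, v.getD i 0) :: ((u.take i).zip (v.take i)).reverse := by
      rw [pvTake_succ u i hila, pvTake_succ v i hilb,
        List.zip_append (by simp; omega), List.reverse_append]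
      rfl
    have hbr0 : summaGo v (addcAt u (i+1) c) i ((u.getD i 0 + c + v.getD i 0) :: res)
        = summaGo v (addcAt u i 0) i ((u.getD i 0 + c + v.getD i 0) :: res) := by
      apply summaGo_congr
      rw [htk, addcAt_zero]
    have hbr1 :
        summaGo v (if 0 < i then (addcAt u (i+1) c).set (i-1) ((addcAt u (i+1) c).getD (i-1) 0 + 1)
            else addcAt u (i+1) c) i ((u.getD i 0 + c + v.getD i 0 - 2) :: res)
        = summaGo v (addcAt u i 1) i ((u.getD i 0 + c + v.getD i 0 - 2) :: res) := by
      apply summaGo_congr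
      by_cases hi : 0 < i
      · simp only [if_pos hi]
        have hg : (addcAt u (i+1) c).getD (i-1) 0 = u.getD (i-1) 0 := by
          rcases hc with hc | hc <;> subst hc
          · rw [addcAt_zero]
          · rw [addcAt_succ_one, List.getD_eq_getElem?_getD, List.getElem?_set_ne (by omega),
              ← List.getD_eq_getElem?_getD]
        have hone : addcAt u i 1 = u.set (i-1) (u.getD (i-1) 0 + 1) := by
          simp [addcAt, hi]
        rw [hg, hone, List.take_set, List.take_set, htk]
      · simp only [if_neg hi]
        have : i = 0 := by omega
        subst this
        rw [htk]
        have : addcAt u 0 1 = u := by simp [addcAt]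
        rw [this]
    simp only [summaGo, hread]
    rw [hzip]
    simp only [addL]
    have harith : u.getD i 0 + v.getD i 0 + c = u.getD i 0 + c + v.getD i 0 := by ring
    rw [harith]
    by_cases hlt : u.getD i 0 + c + v.getD i 0 < 2
    · rw [if_pos hlt, if_pos hlt, hbr0,
        ih u v ((u.getD i 0 + c + v.getD i 0) :: res) 0 (Or.inl rfl) (by omega) (by omega)]
      rw [List.reverse_cons, List.append_assoc]
      rfl
    · rw [if_neg hlt, if_neg hlt, hbr1,
        ih u v ((u.getD i 0 + c + v.getD i 0 - 2) :: res) 1 (Or.inr rfl) (by omega) (by omega)]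
      rw [List.reverse_cons, List.append_assoc]
      rfl

theorem summa_addL (u v : List Int) (h : u.length = v.length) :
    summa u v = (addL ((u.zip v).reverse) 0).reverse := by
  have H := summaGo_addL u.length u v [] 0 (Or.inl rfl) le_rfl (le_of_eq h)
  rw [addcAt_zero, List.take_length, List.append_nil, h, List.take_length] at H
  rw [summa, h]
  exact H

theorem pvZip_reverse : ∀ (u v : List Int), u.length = v.length →
    (u.zip v).reverse = u.reverse.zip v.reverse := by
  intro u
  induction u with
  | nil => intro v h; cases v <;> simp at h ⊢
  | cons x u' ih =>
    intro v h
    cases v with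
    | nil => simp at h
    | cons y v' =>
      simp only [List.length_cons, Nat.add_right_cancel_iff] at h
      rw [List.zip_cons_cons, List.reverse_cons, List.reverse_cons, List.reverse_cons,
        List.zip_append (by simp [h]), ih v' h]
      rfl

theorem incL_length : ∀ (fs : List Int) (c : Int), (incL fs c).length = fs.length := by
  intro fs
  induction fs with
  | nil => intro c; rfl
  | cons f rest ih =>
    intro c
    simp only [incL]
    split <;> simp [ih]

theorem addL_zip_zeros : ∀ (fs : List Int) (k : Nat) (c : Int), fs.length ≤ k →
    addL (fs.zip (List.replicate k 0)) c = incL fs c := by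
  intro fs
  induction fs with
  | nil => intro k c _; simp [addL, incL]
  | cons f rest ih =>
    intro k c hk
    cases k with
    | zero => simp at hk
    | succ k' =>
      rw [List.replicate_succ, List.zip_cons_cons]
      simp only [addL, incL]
      have : f + 0 + c = f + c := by ring
      rw [this, ih k' 0 (by simpa using hk), ih k' 1 (by simpa using hk)]

theorem addL_zip_one (fs : List Int) (k : Nat) (hk : fs.length ≤ k + 1) :
    addL (fs.zip ((1:Int) :: List.replicate k 0)) 0 = incL fs 1 := by
  cases fs with
  | nil => simp [addL, incL]
  | cons f rest =>
    rw [List.zip_cons_cons]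
    simp only [addL, incL]
    have : f + 1 + 0 = f + 1 := by ring
    rw [this, addL_zip_zeros rest k 0 (by simpa using hk),
      addL_zip_zeros rest k 1 (by simpa using hk)]

theorem incL_concat : ∀ (fs : List Int) (g c : Int),
    ∃ q, incL (fs ++ [g]) c = incL fs c ++ [q] := by
  intro fs
  induction fs with
  | nil => intro g c; exact ⟨if g + c < 2 then g + c else g + c - 2, by simp [incL]; split <;> rfl⟩
  | cons f rest ih =>
    intro g c
    simp only [List.cons_append, incL]
    split
    · obtain ⟨q, hq⟩ := ih g 0
      exact ⟨q, by rw [hq]; rfl⟩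
    · obtain ⟨q, hq⟩ := ih g 1
      exact ⟨q, by rw [hq]; rfl⟩

theorem addL_concat : ∀ (ps : List (Int × Int)) (p : Int × Int) (c : Int),
    ∃ q, addL (ps ++ [p]) c = addL ps c ++ [q] := by
  intro ps
  induction ps with
  | nil =>
    intro p c
    refine ⟨if p.1 + p.2 + c < 2 then p.1 + p.2 + c else p.1 + p.2 + c - 2, ?_⟩
    obtain ⟨x, y⟩ := p
    simp [addL]; split <;> rfl
  | cons hd rest ih =>
    intro p c
    obtain ⟨x, y⟩ := hd
    simp only [List.cons_append, addL]
    split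
    · obtain ⟨q, hq⟩ := ih p 0
      exact ⟨q, by rw [hq]; rfl⟩
    · obtain ⟨q, hq⟩ := ih p 1
      exact ⟨q, by rw [hq]; rfl⟩

def flipf (v : Int) : Int := if v = 0 then 1 else 0

theorem fuse_addL : ∀ (xs ds : List Int) (c1 c2 : Int), xs.length = ds.length →
    fuseGo (xs.zip ds) c1 c2 = addL (xs.zip (incL (ds.map flipf) c1)) c2 := by
  intro xs
  induction xs with
  | nil => intro ds c1 c2 _; simp [fuseGo, addL]
  | cons x xs' ih =>
    intro ds c1 c2 h
    cases ds with
    | nil => simp at h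
    | cons d ds' =>
      simp only [List.length_cons, Nat.add_right_cancel_iff] at h
      rw [List.zip_cons_cons, List.map_cons]
      simp only [fuseGo, incL, flipf]
      by_cases h1 : (if d = 0 then (1:Int) else 0) + c1 < 2
      · simp only [if_pos h1, List.zip_cons_cons, addL]
        by_cases h2 : x + ((if d = 0 then (1:Int) else 0) + c1) + c2 < 2
        · simp only [if_pos h2]
          rw [ih ds' 0 _ h]
        · simp only [if_neg h2]
          rw [ih ds' 0 _ h]
      · simp only [if_neg h1, List.zip_cons_cons, addL]
        by_cases h2 : x + ((if d = 0 then (1:Int) else 0) + c1 - 2) + c2 < 2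
        · simp only [if_pos h2]
          rw [ih ds' 1 _ h]
        · simp only [if_neg h2]
          rw [ih ds' 1 _ h]

theorem subtract_eq (a b : List Int) (hlen : b.length ≤ a.length) :
    subtract_numbers a b = subB a b := by
  set m := a.length with hm
  set pad : List Int := List.replicate (m - b.length) 0 ++ b with hpad
  have hpadlen : pad.length = m := by simp [hpad]; omega
  -- A's pipeline, named
  have hshow : subtract_numbers a b
      = (summa ((0:Int) :: a) (add_one (swap ((1:Int) :: pad)))).tail := rfl
  have hswap : swap ((1:Int) :: pad) = (1:Int) :: pad.map flipf := by
    simp [swap, flipf]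
  have hZlen : ((1:Int) :: pad.map flipf).length = m + 1 := by simp [hpadlen]
  have hones : add_one ((1:Int) :: pad.map flipf)
      = summa ((1:Int) :: pad.map flipf) (List.replicate m 0 ++ [1]) := by
    rw [add_one, hZlen]
    simp
  have honeslen : (List.replicate m (0:Int) ++ [1]).length = m + 1 := by simp
  -- W, LSB-first
  have hW : (add_one ((1:Int) :: pad.map flipf)).reverse
      = incL (pad.reverse.map flipf ++ [1]) 1 := by
    rw [hones, summa_addL _ _ (by rw [hZlen, honeslen]),
      pvZip_reverse _ _ (by rw [hZlen, honeslen]), List.reverse_reverse]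
    have h1 : ((1:Int) :: pad.map flipf).reverse = pad.reverse.map flipf ++ [1] := by
      rw [List.reverse_cons, List.map_reverse]
    have h2 : (List.replicate m (0:Int) ++ [1]).reverse = (1:Int) :: List.replicate m 0 := by
      rw [List.reverse_append, List.reverse_replicate]
      rfl
    rw [h1, h2]
    exact addL_zip_one _ m (by simp [hpadlen])
  obtain ⟨q, hq⟩ := incL_concat (pad.reverse.map flipf) 1 1
  have hWlen : (add_one ((1:Int) :: pad.map flipf)).reverse.length = m + 1 := by
    rw [hW, hq]
    simp [incL_length, hpadlen]
  have hWlen' : (add_one ((1:Int) :: pad.map flipf)).length = m + 1 := by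
    have := hWlen
    simpa using this
  have hsumma : summa ((0:Int) :: a) (add_one (swap ((1:Int) :: pad)))
      = (addL (((0:Int) :: a).reverse.zip (add_one ((1:Int) :: pad.map flipf)).reverse) 0).reverse := by
    rw [hswap, summa_addL _ _ (by rw [hWlen']; simp; omega),
      pvZip_reverse _ _ (by rw [hWlen']; simp; omega)]
  have hzipsplit : ((0:Int) :: a).reverse.zip (add_one ((1:Int) :: pad.map flipf)).reverse
      = a.reverse.zip (incL (pad.reverse.map flipf) 1) ++ [((0:Int), q)] := by
    rw [List.reverse_cons, hW, hq, List.zip_append (by simp [incL_length, hpadlen]; omega)]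
    rfl
  obtain ⟨q2, hq2⟩ := addL_concat (a.reverse.zip (incL (pad.reverse.map flipf) 1)) ((0:Int), q) 0
  rw [hshow, hsumma, hzipsplit, hq2, List.reverse_append]
  simp only [List.reverse_cons, List.reverse_nil, List.nil_append, List.singleton_append,
    List.tail_cons]
  rw [subB, fuse_addL _ _ 1 0 (by simp [incL_length, hpadlen]; omega), List.map_reverse]

theorem compareGo_geGo : ∀ (fuel : Nat) (n1 n2 : List Int), n1.length = n2.length →
    ∀ ix, n1.length - ix ≤ fuel →
    compareGo n1 n2 ix = geGo ((n1.drop ix).zip (n2.drop ix)) := by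
  intro fuel
  induction fuel with
  | zero =>
    intro n1 n2 hl ix hfx
    rw [compareGo, if_neg (by omega), List.drop_eq_nil_of_le (by omega)]
    rfl
  | succ fuel ih =>
    intro n1 n2 hl ix hfx
    by_cases hix : ix < n1.length
    · have hix2 : ix < n2.length := by omega
      have hd1 : n1.drop ix = n1.getD ix 0 :: n1.drop (ix+1) := by
        rw [List.getD_eq_getElem?_getD, List.getElem?_eq_getElem hix]
        exact List.drop_eq_getElem_cons hix
      have hd2 : n2.drop ix = n2.getD ix 0 :: n2.drop (ix+1) := by
        rw [List.getD_eq_getElem?_getD, List.getElem?_eq_getElem hix2]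
        exact List.drop_eq_getElem_cons hix2
      rw [compareGo, if_pos hix, hd1, hd2, List.zip_cons_cons]
      simp only [geGo, ← List.getD_eq_getElem?_getD]
      by_cases hxy : n1.getD ix 0 = n2.getD ix 0
      · rw [hxy]
        simp only [gt_iff_lt, lt_irrefl, if_false, if_pos rfl, ne_eq, not_true_eq_false]
        exact ih n1 n2 hl (ix+1) (by omega)
      · rw [if_pos hxy]
        by_cases hgt : n1.getD ix 0 > n2.getD ix 0
        · rw [if_pos hgt]
          exact (decide_eq_true hgt).symm
        · rw [if_neg hgt, if_neg hxy]
          exact (decide_eq_false hgt).symm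
    · rw [compareGo, if_neg hix, List.drop_eq_nil_of_le (by omega)]
      rfl

theorem compare_eq (a b : List Int) : compare_numbers a b = geB a b := by
  rw [compare_numbers, geB]
  by_cases hlt : a.length < b.length
  · rw [if_pos hlt, if_pos hlt]
  · rw [if_neg hlt, if_neg hlt,
      compareGo_geGo a.length a _ (by simp; omega) 0 (by omega)]
    simp

theorem divGo_eq_bGo (n2 : List Int) : ∀ (k : Nat) (r q : List Int),
    divGo n2 k r q = bGo n2 k r q := by
  intro k
  induction k with
  | zero => intro r q; rfl
  | succ k ih =>
    intro r q
    simp only [divGo, bGo]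
    rw [compare_eq]
    by_cases hc : geB (r ++ [0]) n2 = true
    · rw [if_pos hc, if_pos hc]
      have hlen : n2.length ≤ (r ++ [0]).length := by
        by_contra hl
        rw [geB, if_pos (by omega)] at hc
        simp at hc
      rw [subtract_eq _ _ hlen, ih]
    · rw [if_neg hc, if_neg hc, ih]

-- ===== VERDICT (by name: the statement is the Claim_ definition above) =====
theorem divide_fraction_spec : Claim_equal_divide_fraction := by
  intro n1 n2 _
  show divide_fraction n1 n2 = divide_fraction_alt n1 n2
  exact divGo_eq_bGo n2 30 n1 []
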